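-- pv_equiv track=rewrite | github.com/lochlannoneill/SOFT8033-BigDataAnalytics-PySpark | my_results/my_A02_Part4_check_results.py | parse_structured_streaming_batch_content
-- ===== SOURCE A (Python) =====
-- def parse_structured_streaming_batch_content(batch_lines, key_column_index):
--     # 1. We create the output variable
--     res = []
--
--     # 2. We create any additional variable needed
--     res_dict = {}
--
--     # 3. We process the batch_lines
--     for line in batch_lines:
--         # 3.1. We get the line as a tuple
--         my_tuple = tuple(line.split("|"))
--
--         # 3.2. We get the key from the tuple
--         my_key = my_tuple[key_column_index]
--
--         # 3.3. We enter the new tuple in the dictionary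
--         if (my_key not in res_dict):
--             res_dict[my_key] = []
--         res_dict[my_key].append( my_tuple )
--
--     # 4. We collect the keys of the dictionary as a list
--     my_ordered_keys = sorted(res_dict.keys())
--
--     # 5. We bring the elements back to res
--     for selected_key in my_ordered_keys:
--         for item in res_dict[selected_key]:
--             my_new_line = "|".join(list(item))
--             res.append(my_new_line)
--
--     # 6. We return res
--     return res
-- ===== SOURCE B (Python) =====
-- def parse_structured_streaming_batch_content(batch_lines, key_column_index):
--     # One stable sort by the key column; splitting and rejoining by '|' would
--     # reproduce each line unchanged, so the lines themselves are returned.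
--     return sorted(batch_lines, key=lambda line: line.split("|")[key_column_index])
-- ===== Notes on version B (the rewrite author's own statement) =====
-- stated objective: idiomatic
-- what changed: Replaces dict-bucketing by key plus a key-sort and per-line split/rejoin reconstruction with a single stable sorted() call keyed on the key column.
import Mathlib
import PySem

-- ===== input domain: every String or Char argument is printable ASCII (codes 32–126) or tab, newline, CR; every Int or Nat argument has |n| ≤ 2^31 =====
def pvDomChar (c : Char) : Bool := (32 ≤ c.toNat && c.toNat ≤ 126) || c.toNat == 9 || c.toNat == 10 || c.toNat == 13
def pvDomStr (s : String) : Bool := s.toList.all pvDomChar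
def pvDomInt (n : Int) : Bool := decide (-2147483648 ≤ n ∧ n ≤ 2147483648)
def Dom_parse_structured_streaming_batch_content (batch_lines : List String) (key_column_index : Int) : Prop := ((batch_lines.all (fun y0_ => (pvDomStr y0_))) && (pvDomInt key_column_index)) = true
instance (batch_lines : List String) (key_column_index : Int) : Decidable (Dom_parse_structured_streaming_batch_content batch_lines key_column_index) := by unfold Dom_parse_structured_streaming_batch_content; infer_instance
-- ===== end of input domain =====

-- B replaces A's dict-bucketing + key-sort + per-line rejoin with one stable sort keyed
-- on the key column (objective: idiomatic; same asymptotic cost).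

-- ===== PORT A =====
def parse_structured_streaming_batch_content (batch_lines : List String) (key_column_index : Int) : List String :=
  -- 1./2. output variable and dictionary
  let res : List String := []
  let res_dict : PySem.Dict String (List (List String)) := PySem.Dict.empty
  -- 3. process the batch_lines
  let res_dict := batch_lines.foldl (fun d line =>
    let my_tuple : List String := (PySem.Str.split? line "|").getD []   -- sep "|" ≠ "", so split? is always some
    let my_key : String := (PySem.List.pyGet? my_tuple key_column_index).getD ""  -- none = IndexError, excluded by Pre_
    let d := if d.contains my_key = false then d.insert my_key ([] : List (List String)) else d
    d.modify my_key [] (fun b => b ++ [my_tuple])) res_dict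
  -- 4. keys sorted
  let my_ordered_keys := PySem.List.sorted res_dict.keys (fun k => k)
  -- 5. bring the elements back to res
  my_ordered_keys.foldl (fun r selected_key =>
    (res_dict.getD selected_key []).foldl (fun r item => r ++ [PySem.Str.join "|" item]) r) res

-- ===== PORT B =====
def parse_structured_streaming_batch_content_alt (batch_lines : List String) (key_column_index : Int) : List String :=
  PySem.List.sorted batch_lines (fun line =>
    (PySem.List.pyGet? ((PySem.Str.split? line "|").getD []) key_column_index).getD "")

-- ===== PRECONDITION & SPEC =====
-- Pre_ excludes exactly the inputs where some line has too few '|'-separated columns for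
-- key_column_index, on which Python A (and B) raise IndexError.
def Pre_parse_structured_streaming_batch_content (batch_lines : List String) (key_column_index : Int) : Prop :=
  ∀ line ∈ batch_lines, PySem.Raise.InRange ((PySem.Str.split? line "|").getD []).length key_column_index
instance (batch_lines : List String) (key_column_index : Int) : Decidable (Pre_parse_structured_streaming_batch_content batch_lines key_column_index) := by unfold Pre_parse_structured_streaming_batch_content; infer_instance
def pvWitness_parse_structured_streaming_batch_content : List String × Int := (["b|2", "a|1", "b|0"], 0)

def Spec_parse_structured_streaming_batch_content (batch_lines : List String) (key_column_index : Int) (out : List String) : Prop := out = parse_structured_streaming_batch_content_alt batch_lines key_column_index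
instance (batch_lines : List String) (key_column_index : Int) (out : List String) : Decidable (Spec_parse_structured_streaming_batch_content batch_lines key_column_index out) := by unfold Spec_parse_structured_streaming_batch_content; infer_instance

-- ===== CLAIM (what is proved, stated in full; the proofs are below) =====
def Claim_equal_parse_structured_streaming_batch_content : Prop := ∀ (batch_lines : List String) (key_column_index : Int), Dom_parse_structured_streaming_batch_content batch_lines key_column_index → Pre_parse_structured_streaming_batch_content batch_lines key_column_index → Spec_parse_structured_streaming_batch_content batch_lines key_column_index (parse_structured_streaming_batch_content batch_lines key_column_index)

-- ===== LEMMAS AND PROOFS =====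


theorem pv_join_cons_ne_nil (sep p : List Char) (rest : List (List Char)) (h : rest ≠ []) :
    PySem.Chars.join sep (p :: rest) = p ++ sep ++ PySem.Chars.join sep rest := by
  cases rest with
  | nil => exact absurd rfl h
  | cons q r => exact PySem.Chars.join_cons_cons sep p q r

theorem pv_join_append_singleton (sep y : List Char) (A : List (List Char)) :
    PySem.Chars.join sep (A ++ [y]) = PySem.Chars.join sep A ++ (if A = [] then [] else sep) ++ y := by
  induction A with
  | nil => simp [PySem.Chars.join_singleton]
  | cons a A ih =>
    rw [List.cons_append, pv_join_cons_ne_nil sep a (A ++ [y]) (by simp)]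
    cases A with
    | nil => simp [PySem.Chars.join_singleton]
    | cons b B =>
      rw [ih, pv_join_cons_ne_nil sep a (b :: B) (by simp)]
      simp

theorem pv_go_join (sep : List Char) (fuel : Nat) (l cur : List Char) (acc : List (List Char)) :
    PySem.Chars.join sep (PySem.Chars.splitOn.go sep fuel l cur acc) =
      PySem.Chars.join sep acc.reverse ++ (if acc = [] then [] else sep) ++ cur.reverse ++ l := by
  induction fuel generalizing l cur acc with
  | zero =>
    have hgo : PySem.Chars.splitOn.go sep 0 l cur acc = ((cur.reverse ++ l) :: acc).reverse := rfl
    rw [hgo, show ((cur.reverse ++ l) :: acc).reverse = acc.reverse ++ [cur.reverse ++ l] by simp,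
      pv_join_append_singleton]
    simp
  | succ n ih =>
    cases l with
    | nil =>
      have hgo : PySem.Chars.splitOn.go sep (n+1) [] cur acc = (cur.reverse :: acc).reverse := rfl
      rw [hgo, show (cur.reverse :: acc).reverse = acc.reverse ++ [cur.reverse] by simp,
        pv_join_append_singleton]
      simp
    | cons c rest =>
      have hgo : PySem.Chars.splitOn.go sep (n+1) (c :: rest) cur acc =
          if sep.isPrefixOf (c :: rest) = true then
            PySem.Chars.splitOn.go sep n (List.drop sep.length (c :: rest)) [] (cur.reverse :: acc)
          else PySem.Chars.splitOn.go sep n rest (c :: cur) acc := rfl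
      rw [hgo]
      by_cases hpre : sep.isPrefixOf (c :: rest) = true
      · rw [if_pos hpre, ih,
          show (cur.reverse :: acc).reverse = acc.reverse ++ [cur.reverse] by simp,
          pv_join_append_singleton]
        have hl : sep ++ List.drop sep.length (c :: rest) = c :: rest :=
          List.prefix_iff_eq_append.mp (List.isPrefixOf_iff_prefix.mp hpre)
        conv_rhs => rw [← hl]
        simp
      · rw [if_neg hpre, ih]
        simp

theorem pv_chars_join_splitOn (sep s : List Char) :
    PySem.Chars.join sep (PySem.Chars.splitOn s sep) = s := by
  rw [PySem.Chars.splitOn, pv_go_join]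
  simp [PySem.Chars.join_nil]

theorem pv_roundtrip (line : String) :
    PySem.Str.join "|" ((PySem.Str.split? line "|").getD []) = line := by
  rw [PySem.Str.split?, PySem.Chars.split?]
  rw [if_neg (by decide)]
  simp only [Option.map_some, Option.getD_some]
  rw [PySem.Str.join]
  rw [show (List.map String.toList (List.map String.ofList (PySem.Chars.splitOn line.toList "|".toList))) = PySem.Chars.splitOn line.toList "|".toList by simp [List.map_map, Function.comp_def, String.toList_ofList]]
  rw [pv_chars_join_splitOn]
  exact String.ofList_toList


theorem pv_insertBy_append {α : Type} (before : α → α → Bool) (x : α) (A B : List α)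
    (h : ∀ a ∈ A, before x a = false) :
    PySem.List.insertBy before x (A ++ B) = A ++ PySem.List.insertBy before x B := by
  induction A with
  | nil => simp
  | cons a A ih =>
    rw [List.cons_append, PySem.List.insertBy]
    rw [h a (by simp)]
    simp only [Bool.false_eq_true, if_false]
    rw [ih (fun a ha => h a (by simp [ha]))]
    cases A ++ B <;> rfl

theorem pv_insertBy_front {α : Type} (before : α → α → Bool) (x : α) (ys : List α)
    (h : ∀ a ∈ ys, before x a = true) :
    PySem.List.insertBy before x ys = x :: ys := by
  cases ys with
  | nil => rfl
  | cons y ys => rw [PySem.List.insertBy, h y (by simp)]; simp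

theorem pv_insertBy_perm {α : Type} (before : α → α → Bool) (x : α) (ys : List α) :
    (PySem.List.insertBy before x ys).Perm (x :: ys) := by
  induction ys with
  | nil => rfl
  | cons y ys ih =>
    rw [PySem.List.insertBy]
    by_cases hb : before x y = true
    · rw [if_pos hb]
    · rw [if_neg hb]
      exact (ih.cons y).trans (List.Perm.swap x y ys)

theorem pv_pairwise_insertBy (kx : String) (ks : List String)
    (hp : ks.Pairwise (· < ·)) (hx : kx ∉ ks) :
    (PySem.List.insertBy (fun a b => decide (a < b)) kx ks).Pairwise (· < ·) := by
  induction ks with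
  | nil => simp [PySem.List.insertBy]
  | cons k ks ih =>
    rw [PySem.List.insertBy]
    rcases List.pairwise_cons.mp hp with ⟨hk, hp'⟩
    by_cases hlt : kx < k
    · rw [if_pos (by simpa using hlt)]
      refine List.pairwise_cons.mpr ⟨?_, hp⟩
      intro b hb
      rcases List.mem_cons.mp hb with rfl | hb
      · exact hlt
      · exact hlt.trans (hk b hb)
    · rw [if_neg (by simpa using hlt)]
      have hne : k ≠ kx := fun h => hx (h ▸ List.mem_cons_self ..)
      have hklt : k < kx := lt_of_le_of_ne (not_lt.mp hlt) (hne)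
      refine List.pairwise_cons.mpr ⟨?_, ih hp' (fun h => hx (List.mem_cons_of_mem _ h))⟩
      intro b hb
      rcases (PySem.List.mem_insertBy _ _ _ _).mp hb with rfl | hb
      · exact hklt
      · exact hk b hb

theorem pv_key_mem_flatMap {α : Type} (key : α → String) (ks : List String)
    (seg : String → List α) (hseg : ∀ k ∈ ks, ∀ a ∈ seg k, key a = k)
    (a : α) (ha : a ∈ ks.flatMap seg) : key a ∈ ks := by
  rcases List.mem_flatMap.mp ha with ⟨k, hk, hak⟩
  rw [hseg k hk a hak]; exact hk

theorem pv_Lmem {α : Type} (key : α → String) (x : α) (ks : List String) (seg : String → List α)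
    (hp : ks.Pairwise (· < ·)) (hx : key x ∈ ks)
    (hseg : ∀ k ∈ ks, ∀ a ∈ seg k, key a = k) :
    PySem.List.insertBy (fun a b => decide (key a < key b)) x (ks.flatMap seg) =
      ks.flatMap (fun k => if k = key x then seg k ++ [x] else seg k) := by
  induction ks with
  | nil => exact absurd hx (by simp)
  | cons k ks ih =>
    rcases List.pairwise_cons.mp hp with ⟨hk, hp'⟩
    rw [List.flatMap_cons, List.flatMap_cons]
    by_cases hke : k = key x
    · have hnot : key x ∉ ks := fun h => lt_irrefl (key x) (hke ▸ hk (key x) h : key x < key x)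
      rw [if_pos hke]
      rw [pv_insertBy_append _ x (seg k) _ (fun a ha => by
        rw [hseg k (by simp) a ha, ← hke]
        simp)]
      rw [pv_insertBy_front _ x _ (fun a ha => by
        have hmem := pv_key_mem_flatMap key ks seg (fun k' hk' => hseg k' (by simp [hk'])) a ha
        simp only [decide_eq_true_eq, ← hke]
        exact hk _ hmem)]
      conv_rhs => rw [List.flatMap_congr (g := seg) (fun k' hk' => by
        rw [if_neg (fun h : k' = key x => hnot (h ▸ hk'))])]
      simp
    · rw [if_neg hke]
      have hx' : key x ∈ ks := by
        rcases List.mem_cons.mp hx with h | h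
        · exact absurd h.symm hke
        · exact h
      rw [pv_insertBy_append _ x (seg k) _ (fun a ha => by
        rw [hseg k (by simp) a ha]
        simp only [decide_eq_false_iff_not, not_lt]
        exact le_of_lt (hk _ hx'))]
      rw [ih hp' hx' (fun k' h' => hseg k' (by simp [h']))]

theorem pv_Lnew {α : Type} (key : α → String) (x : α) (ks : List String) (seg : String → List α)
    (hp : ks.Pairwise (· < ·)) (hx : key x ∉ ks)
    (hseg : ∀ k ∈ ks, ∀ a ∈ seg k, key a = k) :
    PySem.List.insertBy (fun a b => decide (key a < key b)) x (ks.flatMap seg) =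
      (PySem.List.insertBy (fun a b => decide (a < b)) (key x) ks).flatMap
        (fun k => if k = key x then [x] else seg k) := by
  induction ks with
  | nil => simp [PySem.List.insertBy]
  | cons k ks ih =>
    rcases List.pairwise_cons.mp hp with ⟨hk, hp'⟩
    have hne : k ≠ key x := fun h => hx (h ▸ List.mem_cons_self ..)
    by_cases hlt : key x < k
    · rw [pv_insertBy_front _ x _ (fun a ha => by
        have hmem := pv_key_mem_flatMap key (k :: ks) seg hseg a ha
        simp only [decide_eq_true_eq]
        rcases List.mem_cons.mp hmem with h | h
        · rw [h]; exact hlt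
        · exact hlt.trans (hk _ h))]
      rw [show PySem.List.insertBy (fun a b => decide (a < b)) (key x) (k :: ks) =
            key x :: k :: ks from by rw [PySem.List.insertBy, if_pos (by simpa using hlt)]]
      conv_rhs => rw [List.flatMap_cons]
      conv_rhs => rw [List.flatMap_congr (g := seg) (fun k' hk' => by
        rw [if_neg (fun h : k' = key x => hx (h ▸ hk'))])]
      simp
    · rw [show PySem.List.insertBy (fun a b => decide (a < b)) (key x) (k :: ks) =
            k :: PySem.List.insertBy (fun a b => decide (a < b)) (key x) ks from by
          rw [PySem.List.insertBy, if_neg (by simpa using hlt)]]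
      conv_lhs => rw [List.flatMap_cons]
      conv_rhs => rw [List.flatMap_cons]
      rw [pv_insertBy_append _ x (seg k) _ (fun a ha => by
        rw [hseg k (by simp) a ha]
        simpa using hlt)]
      rw [ih hp' (fun h => hx (List.mem_cons_of_mem _ h)) (fun k' h' => hseg k' (by simp [h']))]
      rw [if_neg hne]

theorem pv_sorted_append_singleton {α : Type} (key : α → String) (xs : List α) (x : α) :
    PySem.List.sorted (xs ++ [x]) key =
      PySem.List.insertBy (fun a b => decide (key a < key b)) x (PySem.List.sorted xs key) := by
  rw [PySem.List.sorted_eq_foldl_insertBy, PySem.List.sorted_eq_foldl_insertBy, List.foldl_append]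
  rfl

theorem pv_stable_sort_flatMap {α : Type} (key : α → String) (xs : List α) :
    PySem.List.sorted xs key =
      (PySem.List.sorted (PySem.Set.ofList (xs.map key)) (fun k => k)).flatMap
        (fun k => xs.filter (fun x => key x == k)) := by
  induction xs using List.reverseRecOn with
  | nil => simp [PySem.Set.ofList, PySem.Set.empty, PySem.List.sorted]
  | append_singleton xs x ih =>
    have hks := PySem.List.sorted_ofList_pairwise_lt (xs.map key)
    have hseg : ∀ k ∈ PySem.List.sorted (PySem.Set.ofList (xs.map key)) (fun k => k),
        ∀ a ∈ xs.filter (fun y => key y == k), key a = k := by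
      intro k _ a ha
      simpa using (List.of_mem_filter ha)
    rw [pv_sorted_append_singleton, ih]
    have hof : PySem.Set.ofList ((xs ++ [x]).map key) =
        PySem.Set.add (PySem.Set.ofList (xs.map key)) (key x) := by
      rw [List.map_append, PySem.Set.ofList, List.foldl_append]
      rfl
    by_cases hx : key x ∈ (xs.map key)
    · have hmemset : key x ∈ PySem.Set.ofList (xs.map key) :=
        (PySem.Set.mem_ofList _ _).mpr hx
      have hadd : PySem.Set.add (PySem.Set.ofList (xs.map key)) (key x) =
          PySem.Set.ofList (xs.map key) := by
        rw [PySem.Set.add, if_pos (by simpa [PySem.Set.contains_iff] using hmemset)]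
      rw [hof, hadd]
      rw [pv_Lmem key x _ _ hks (by simpa [PySem.List.mem_sorted] using hmemset) hseg]
      apply List.flatMap_congr
      intro k hk
      rw [List.filter_append]
      by_cases hke : k = key x
      · rw [if_pos hke, List.filter_cons]
        simp [hke]
      · rw [if_neg hke, List.filter_cons]
        have : (key x == k) = false := by
          simp only [beq_eq_false_iff_ne]; exact fun h => hke h.symm
        simp [this]
    · have hnotset : key x ∉ PySem.List.sorted (PySem.Set.ofList (xs.map key)) (fun k => k) := by
        rw [PySem.List.mem_sorted, PySem.Set.mem_ofList]
        exact hx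
      rw [pv_Lnew key x _ _ hks hnotset hseg, hof]
      have hsorted_add : PySem.List.sorted
            (PySem.Set.add (PySem.Set.ofList (xs.map key)) (key x)) (fun k => k) =
          PySem.List.insertBy (fun a b => decide (a < b)) (key x)
            (PySem.List.sorted (PySem.Set.ofList (xs.map key)) (fun k => k)) := by
        have hadd : PySem.Set.add (PySem.Set.ofList (xs.map key)) (key x) =
            PySem.Set.ofList (xs.map key) ++ [key x] := by
          rw [PySem.Set.add, if_neg (by
            simp only [PySem.Set.contains_iff]
            simpa [PySem.Set.mem_ofList] using hx)]
        rw [hadd]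
        apply PySem.List.sorted_eq_of_perm_of_pairwise_lt
        · refine ((pv_insertBy_perm _ _ _).trans ?_)
          refine ((PySem.List.sorted_perm _ _ _).cons (key x)).trans ?_
          exact (List.perm_append_singleton _ _).symm
        · exact pv_pairwise_insertBy _ _ hks hnotset
      rw [hsorted_add]
      apply List.flatMap_congr
      intro k hk
      have hkmem : k = key x ∨ k ∈ PySem.List.sorted (PySem.Set.ofList (xs.map key)) (fun k => k) :=
        (PySem.List.mem_insertBy _ _ _ _).mp hk
      rw [List.filter_append]
      by_cases hke : k = key x
      · subst hke
        rw [if_pos rfl, List.filter_cons]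
        have hfilnil : xs.filter (fun y => key y == key x) = [] := by
          rw [List.filter_eq_nil_iff]
          intro a ha h
          have h' : key a = key x := beq_iff_eq.mp (by simpa using h)
          exact hx (h' ▸ List.mem_map_of_mem ha)
        simp [hfilnil]
      · rw [if_neg hke, List.filter_cons]
        have : (key x == k) = false := by
          simp only [beq_eq_false_iff_ne]; exact fun h => hke h.symm
        simp [this]

def pvKey (idx : Int) (line : String) : String :=
  (PySem.List.pyGet? ((PySem.Str.split? line "|").getD []) idx).getD ""
def pvTup (line : String) : List String := (PySem.Str.split? line "|").getD []

theorem pv_stepA (d : PySem.Dict String (List (List String))) (k : String) (t : List String) :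
    (if d.contains k = false then d.insert k ([] : List (List String)) else d).modify k []
        (fun b => b ++ [t]) = d.modify k [] (fun b => b ++ [t]) := by
  by_cases hc : d.contains k = false
  · rw [if_pos hc, PySem.Dict.modify, PySem.Dict.modify]
    rw [PySem.Dict.getD_insert_self, PySem.Dict.insert_insert_self,
      PySem.Dict.getD_of_not_contains d [] hc]
  · rw [if_neg hc]

theorem pv_inner_fold (bucket : List (List String)) (r : List String) :
    bucket.foldl (fun r item => r ++ [PySem.Str.join "|" item]) r
      = r ++ bucket.map (PySem.Str.join "|") := by
  rw [PySem.List.foldl_append_eq_flatMap]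
  congr 1
  induction bucket with
  | nil => rfl
  | cons b bs ih => simp_all

theorem pv_A_closed (batch_lines : List String) (idx : Int) :
    parse_structured_streaming_batch_content batch_lines idx =
      (PySem.List.sorted (PySem.Set.ofList (batch_lines.map (pvKey idx))) (fun k => k)).flatMap
        (fun k => ((batch_lines.filter (fun l => pvKey idx l == k)).map pvTup).map
          (PySem.Str.join "|")) := by
  unfold parse_structured_streaming_batch_content
  simp only [pv_stepA]
  rw [show (fun (d : PySem.Dict String (List (List String))) (line : String) =>
      d.modify ((PySem.List.pyGet? ((PySem.Str.split? line "|").getD []) idx).getD "") []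
        (fun b => b ++ [(PySem.Str.split? line "|").getD []])) =
      (fun d line => d.modify (pvKey idx line) [] (fun b => b ++ [pvTup line])) from rfl]
  -- the dictionary built by the loop
  have hfold : batch_lines.foldl (fun d line =>
      d.modify (pvKey idx line) [] (fun b => b ++ [pvTup line])) PySem.Dict.empty =
      (batch_lines.map (fun line => (pvKey idx line, pvTup line))).foldl
        (fun d p => d.modify p.1 [] (fun b => b ++ [p.2])) PySem.Dict.empty := by
    rw [List.foldl_map]
  simp only [pv_inner_fold]
  rw [PySem.List.foldl_append_eq_flatMap, List.nil_append]
  have hkeys : (batch_lines.foldl (fun d line =>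
      d.modify (pvKey idx line) [] (fun b => b ++ [pvTup line])) PySem.Dict.empty).keys =
      PySem.Set.ofList (batch_lines.map (pvKey idx)) := by
    rw [PySem.Dict.keys_foldl_modify_key batch_lines (pvKey idx) []
      (fun _ line b => b ++ [pvTup line]) PySem.Dict.empty]
    rfl
  have hgetD : ∀ k, (batch_lines.foldl (fun d line =>
      d.modify (pvKey idx line) [] (fun b => b ++ [pvTup line])) PySem.Dict.empty).getD k [] =
      (batch_lines.filter (fun l => pvKey idx l == k)).map pvTup := by
    intro k
    rw [hfold, PySem.Dict.getD_foldl_modify_append, PySem.Dict.getD_empty]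
    rw [List.filter_map, List.map_map]
    simp [Function.comp_def]
  rw [hkeys]
  apply List.flatMap_congr
  intro k _
  rw [hgetD]

-- ===== VERDICT (by name: the statement is the Claim_ definition above) =====
theorem parse_structured_streaming_batch_content_spec : Claim_equal_parse_structured_streaming_batch_content := by
  intro batch_lines idx _ _
  unfold Spec_parse_structured_streaming_batch_content parse_structured_streaming_batch_content_alt
  rw [pv_A_closed]
  rw [show (fun line => (PySem.List.pyGet? ((PySem.Str.split? line "|").getD []) idx).getD "") = pvKey idx from rfl]
  rw [pv_stable_sort_flatMap (pvKey idx) batch_lines]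
  apply List.flatMap_congr
  intro k _
  rw [List.map_map]
  conv_rhs => rw [← List.map_id (List.filter (fun l => pvKey idx l == k) batch_lines)]
  apply List.map_congr_left
  intro a _
  simpa [Function.comp, pvTup] using pv_roundtrip a
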